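-- pv_equiv track=rewrite | github.com/yunhacho/SelfStudy | Algorithm/Programmers_입국심사.py | solution
-- ===== SOURCE A (Python) =====
-- def solution(n, times):
--     left=1; right=max(times)*n; min_time=0
--     while left <= right:
--         mid=(left+right)//2
--         if number_of_passed(mid, times) >=n:
--             right=mid-1
--             min_time=mid
--         else: left=mid+1
--     return min_time
--
-- def number_of_passed(t, times):
--     return sum([t//n for n in times])
-- ===== SOURCE B (Python) =====
-- def solution(n, times):
--     def go(lo, size, best):
--         if size <= 0:
--             return best
--         half = (size - 1) // 2
--         mid = lo + half
--         passed = 0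
--         for x in times:
--             passed += mid // x
--         if passed >= n:
--             return go(lo, half, mid)
--         return go(mid + 1, size - half - 1, best)
--     return go(1, max(times) * n, 0)
-- ===== Notes on version B (the rewrite author's own statement) =====
-- stated objective: alternative
-- what changed: Replaces the imperative two-bound (left/right/min_time) while-loop bisection by a recursive lower_bound-style search over an (offset, size) window: the step is computed from the window size, the best answer is threaded through the recursion as an accumulator, and the feasibility count is a running sum instead of summing a built list.
import Mathlib
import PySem

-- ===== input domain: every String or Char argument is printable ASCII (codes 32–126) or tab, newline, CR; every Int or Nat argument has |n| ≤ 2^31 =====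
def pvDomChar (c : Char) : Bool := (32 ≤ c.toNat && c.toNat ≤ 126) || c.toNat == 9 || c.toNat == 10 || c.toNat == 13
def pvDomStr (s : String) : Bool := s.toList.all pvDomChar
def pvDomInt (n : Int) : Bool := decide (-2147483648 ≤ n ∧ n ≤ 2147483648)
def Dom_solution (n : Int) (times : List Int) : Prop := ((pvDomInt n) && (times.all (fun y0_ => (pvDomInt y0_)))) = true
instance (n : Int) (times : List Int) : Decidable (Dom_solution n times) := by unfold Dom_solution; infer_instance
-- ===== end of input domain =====

-- B replaces A's two-bound while-loop bisection by a recursive lower_bound-style search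
-- over an (offset, size) window with the best answer as an accumulator and a running
-- feasibility sum; same probe sequence and cost (objective: alternative decomposition).


-- ===== PORT A =====
-- sum([t//n for n in times])
def number_of_passed (t : Int) (times : List Int) : Int :=
  (times.map (fun m => PySem.Int.floordiv t m)).sum

-- A's while loop, state (left, right, min_time); fuel only makes the recursion
-- structural and is seeded large enough to never run out (the interval length
-- strictly decreases each iteration)
def solutionLoop (n : Int) (times : List Int) : Nat → Int → Int → Int → Int
  | 0, _, _, min_time => min_time
  | fuel + 1, left, right, min_time =>
    if left ≤ right then
      let mid := PySem.Int.floordiv (left + right) 2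
      if number_of_passed mid times ≥ n then
        solutionLoop n times fuel left (mid - 1) mid
      else
        solutionLoop n times fuel (mid + 1) right min_time
    else min_time

def solution (n : Int) (times : List Int) : Int :=
  match PySem.List.max? times (fun x => x) with
  | none => 0  -- max([]) raises ValueError; excluded by Pre_solution
  | some m => solutionLoop n times ((m * n).toNat + 1) 1 (m * n) 0

-- ===== PORT B =====
-- Source B's recursive helper go(lo, size, best); the window is (offset, size), the step
-- comes from the size, the running sum accumulates the count; fuel as above
def searchGo (n : Int) (times : List Int) : Nat → Int → Int → Int → Int
  | 0, _, _, best => best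
  | fuel + 1, lo, size, best =>
    if size ≤ 0 then best
    else
      let half := PySem.Int.floordiv (size - 1) 2
      let mid := lo + half
      let passed := times.foldl (fun acc x => acc + PySem.Int.floordiv mid x) 0
      if passed ≥ n then searchGo n times fuel lo half mid
      else searchGo n times fuel (mid + 1) (size - half - 1) best

def solution_alt (n : Int) (times : List Int) : Int :=
  match PySem.List.max? times (fun x => x) with
  | none => 0  -- max([]) raises ValueError; excluded by Pre_solution
  | some m => searchGo n times ((m * n).toNat + 1) 1 (m * n) 0

-- ===== PRECONDITION & SPEC =====
-- Pre_ excludes exactly the inputs where A raises: empty times (ValueError from max),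
-- and a 0 in times when the search interval [1, max*n] is nonempty (ZeroDivisionError).
def Pre_solution (n : Int) (times : List Int) : Prop :=
  times ≠ [] ∧ ((0 : Int) ∈ times → ((PySem.List.max? times (fun x => x)).getD 0) * n < 1)
instance (n : Int) (times : List Int) : Decidable (Pre_solution n times) := by
  unfold Pre_solution; infer_instance

def pvWitness_solution : Int × List Int := (6, [7, 10])

def Spec_solution (n : Int) (times : List Int) (out : Int) : Prop := out = solution_alt n times
instance (n : Int) (times : List Int) (out : Int) : Decidable (Spec_solution n times out) := by
  unfold Spec_solution; infer_instance

-- ===== CLAIM (what is proved, stated in full; the proofs are below) =====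
def Claim_equal_solution : Prop := ∀ (n : Int) (times : List Int), Dom_solution n times → Pre_solution n times → Spec_solution n times (solution n times)

-- ===== LEMMAS AND PROOFS =====

-- B's running-sum count equals A's map-sum count
theorem count_eq (t : Int) (times : List Int) :
    times.foldl (fun acc x => acc + PySem.Int.floordiv t x) 0 = number_of_passed t times := by
  unfold number_of_passed
  rw [List.sum_eq_foldl, ← List.foldl_map]

-- A's midpoint (l+r)//2 is B's offset + (size-1)//2 with size = r-l+1
theorem mid_shift (l r : Int) :
    PySem.Int.floordiv (l + r) 2 = l + PySem.Int.floordiv (r - l) 2 := by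
  have h := (PySem.Int.floordiv_eq_iff_of_pos (b := 2) (by norm_num)).mp
    (rfl : PySem.Int.floordiv (r - l) 2 = PySem.Int.floordiv (r - l) 2)
  rw [PySem.Int.floordiv_eq_iff_of_pos (by norm_num)]
  omega

-- state correspondence: A's (left, right) is B's (lo, size) via size = right - left + 1
theorem loop_eq_go (n : Int) (times : List Int) :
    ∀ (fuel : Nat) (l r best : Int),
      solutionLoop n times fuel l r best = searchGo n times fuel l (r - l + 1) best := by
  intro fuel
  induction fuel with
  | zero => intro l r best; rfl
  | succ fuel ih =>
    intro l r best
    rw [solutionLoop, searchGo]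
    simp only [count_eq]
    by_cases hlr : l ≤ r
    · rw [if_pos hlr, if_neg (show ¬ r - l + 1 ≤ 0 by omega)]
      have hm : PySem.Int.floordiv (l + r) 2 = l + PySem.Int.floordiv (r - l + 1 - 1) 2 := by
        rw [show r - l + 1 - 1 = r - l by ring]; exact mid_shift l r
      rw [← hm]
      by_cases hfeas : number_of_passed (PySem.Int.floordiv (l + r) 2) times ≥ n
      · rw [if_pos hfeas, if_pos hfeas, ih]
        congr 1
        omega
      · rw [if_neg hfeas, if_neg hfeas, ih]
        congr 1
        omega
    · rw [if_pos (show r - l + 1 ≤ 0 by omega), if_neg hlr]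

-- ===== VERDICT (by name: the statement is the Claim_ definition above) =====
theorem solution_spec : Claim_equal_solution := by
  intro n times _ _
  unfold Spec_solution solution solution_alt
  cases hmx : PySem.List.max? times (fun x => x) with
  | none => rfl
  | some m =>
    have h := loop_eq_go n times ((m * n).toNat + 1) 1 (m * n) 0
    simpa using h
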